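-- pv_equiv track=rewrite | github.com/gc-os-ai/pyaptamer | pyaptamer/utils/_plot.py | _get_protein_token_lengths
-- ===== SOURCE A (Python) =====
-- def _get_protein_token_lengths(
--     seq: str, words: dict[str, int | float], word_max_len: int = 3
-- ) -> list[int]:
--     """Helper function to reconstruct token lengths from greedy tokenizer."""
--     token_lengths = []
--     i = 0
--     while i < len(seq):
--         matched = False
--         for pattern_len in range(min(word_max_len, len(seq) - i), 0, -1):
--             if seq[i : i + pattern_len] in words:
--                 token_lengths.append(pattern_len)
--                 i += pattern_len
--                 matched = True
--                 break
--         if not matched: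
--             token_lengths.append(1)
--             i += 1
--     return token_lengths
-- ===== SOURCE B (Python) =====
-- def _get_protein_token_lengths(seq, words, word_max_len=3):
--     """Trie-based reconstruction of greedy-tokenizer token lengths."""
--     # Build a trie over the dict's keys: node = dict char -> child; None marks a complete word.
--     root = {}
--     for w in words:
--         node = root
--         for ch in w:
--             node = node.setdefault(ch, {})
--         node[None] = True
--     out = []
--     i, n = 0, len(seq)
--     while i < n:
--         node, best, depth = root, 0, 0
--         while depth < word_max_len and i + depth < n:
--             nxt = node.get(seq[i + depth])
--             if nxt is None:
--                 break
--             node = nxt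
--             depth += 1
--             if None in node:
--                 best = depth
--         step = best if best else 1
--         out.append(step)
--         i += step
--     return out
-- ===== Notes on version B (the rewrite author's own statement) =====
-- stated objective: faster
-- what changed: Replaces the per-position descending loop of string slices hashed against the dict with a trie built once from the keys and a single capped per-character descent that records the deepest complete-word depth.
import Mathlib
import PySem

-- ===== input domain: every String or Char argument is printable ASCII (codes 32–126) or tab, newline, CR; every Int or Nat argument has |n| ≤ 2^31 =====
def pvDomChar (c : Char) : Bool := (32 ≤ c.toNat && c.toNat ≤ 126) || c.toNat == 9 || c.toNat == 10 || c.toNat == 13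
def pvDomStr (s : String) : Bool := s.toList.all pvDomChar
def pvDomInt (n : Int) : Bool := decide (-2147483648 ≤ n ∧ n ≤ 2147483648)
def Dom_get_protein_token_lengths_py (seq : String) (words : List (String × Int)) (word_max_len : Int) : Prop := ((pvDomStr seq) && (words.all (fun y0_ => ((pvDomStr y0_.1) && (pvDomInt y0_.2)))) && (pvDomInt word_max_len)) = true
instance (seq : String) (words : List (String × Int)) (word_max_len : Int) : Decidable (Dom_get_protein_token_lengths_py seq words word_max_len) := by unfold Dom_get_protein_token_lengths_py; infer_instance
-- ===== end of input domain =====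

-- B replaces A's per-position descending scan of string slices against the dict with a trie built
-- once from the keys and a capped per-character descent (objective: alternative algorithm).


-- ===== PORT A =====
-- 'seq[i:i+L] in words' — key membership in the dict (unique keys; assoc-list key test)
def pvKeyMem (words : List (String × Int)) (s : List Char) : Bool :=
  words.any (fun p => p.1.toList == s)

-- the for-loop 'for pattern_len in range(m, 0, -1): if seq[i:i+pattern_len] in words: … break'
def pvAFind (words : List (String × Int)) (cs : List Char) : Nat → Option Nat
  | 0 => none
  | L + 1 => if pvKeyMem words (cs.take (L + 1)) then some (L + 1) else pvAFind words cs L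

theorem pvAFind_pos (words : List (String × Int)) (cs : List Char) (j L : Nat)
    (h : pvAFind words cs j = some L) : 1 ≤ L := by
  induction j with
  | zero => simp [pvAFind] at h
  | succ j ih =>
    simp only [pvAFind] at h
    split at h
    · injection h with h'; omega
    · exact ih h

-- the 'while i < len(seq)' loop, recursion on the suffix seq[i:]
def pvAGo (words : List (String × Int)) (wml : Int) : List Char → List Int
  | [] => []
  | c :: rest =>
    match h : pvAFind words (c :: rest) (min wml ((c :: rest).length : Int)).toNat with
    | some L => (L : Int) :: pvAGo words wml ((c :: rest).drop L)
    | none => 1 :: pvAGo words wml rest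
  termination_by cs => cs.length
  decreasing_by
  · have h1 := pvAFind_pos words (c :: rest) _ _ h
    simp [List.length_drop]
    omega
  · simp

def get_protein_token_lengths_py (seq : String) (words : List (String × Int)) (word_max_len : Int) : List Int :=
  pvAGo words word_max_len seq.toList

-- ===== PORT B =====
-- trie in first-child / next-sibling form: node char, 'None in node' word flag, child chain, sibling
inductive PvTrie where
  | nil : PvTrie
  | node : Char → Bool → PvTrie → PvTrie → PvTrie

-- 'node.get(c)' on a children chain: the found child's word flag and its own chain
def pvFind : PvTrie → Char → Option (Bool × PvTrie)
  | .nil, _ => none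
  | .node d w ch sib, c => if c = d then some (w, ch) else pvFind sib c

-- descend/create along one key's characters ('node = node.setdefault(ch, {})' + end marker)
def pvInsertCh : PvTrie → Char → List Char → PvTrie
  | .nil, c, [] => .node c true .nil .nil
  | .nil, c, c' :: r => .node c false (pvInsertCh .nil c' r) .nil
  | .node d w ch sib, c, rs =>
    if c = d then
      match rs with
      | [] => .node d true ch sib
      | c' :: r => .node d w (pvInsertCh ch c' r) sib
    else .node d w ch (pvInsertCh sib c rs)
  termination_by t _ rs => (rs.length, sizeOf t)

-- insert one key into the root (word flag of the root, chain of its children)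
def pvInsertT : Bool × PvTrie → List Char → Bool × PvTrie
  | (_, ch), [] => (true, ch)
  | (b, ch), c :: r => (b, pvInsertCh ch c r)

-- the trie-building loop 'for w in words: …'
def pvBuild (words : List (String × Int)) : Bool × PvTrie :=
  words.foldl (fun t p => pvInsertT t p.1.toList) (false, .nil)

-- the inner 'while depth < word_max_len and i+depth < n' descent from one position
def pvWalk (ch : PvTrie) (cs : List Char) (cap depth best : Nat) : Nat :=
  match cs with
  | [] => best
  | c :: rest =>
    if depth < cap then
      match pvFind ch c with
      | none => best
      | some (w, ch') => pvWalk ch' rest cap (depth + 1) (if w then depth + 1 else best)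
    else best

-- the outer 'while i < n' loop, on the suffix seq[i:]
def pvBGo (root : PvTrie) (cap : Nat) : List Char → List Int
  | [] => []
  | c :: rest =>
    let b := pvWalk root (c :: rest) cap 0 0
    let step := if b = 0 then 1 else b
    (step : Int) :: pvBGo root cap ((c :: rest).drop step)
  termination_by cs => cs.length
  decreasing_by
    simp [List.length_drop]
    split <;> omega

def get_protein_token_lengths_py_alt (seq : String) (words : List (String × Int)) (word_max_len : Int) : List Int :=
  pvBGo (pvBuild words).2 word_max_len.toNat seq.toList

-- ===== PRECONDITION & SPEC =====
def Spec_get_protein_token_lengths_py (seq : String) (words : List (String × Int)) (word_max_len : Int) (out : List Int) : Prop := out = get_protein_token_lengths_py_alt seq words word_max_len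
instance (seq : String) (words : List (String × Int)) (word_max_len : Int) (out : List Int) : Decidable (Spec_get_protein_token_lengths_py seq words word_max_len out) := by unfold Spec_get_protein_token_lengths_py; infer_instance

-- ===== CLAIM (what is proved, stated in full; the proofs are below) =====
def Claim_equal_get_protein_token_lengths_py : Prop := ∀ (seq : String) (words : List (String × Int)) (word_max_len : Int), Dom_get_protein_token_lengths_py seq words word_max_len → Spec_get_protein_token_lengths_py seq words word_max_len (get_protein_token_lengths_py seq words word_max_len)

-- ===== LEMMAS AND PROOFS =====

-- trie membership (proof-side characterisation of the built trie)
def pvMemT : Bool × PvTrie → List Char → Bool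
  | (b, _), [] => b
  | (_, ch), c :: r =>
    match pvFind ch c with
    | none => false
    | some p => pvMemT p r

-- best reachable word depth, structurally (proof helper mirroring the descent)
def pvBM : PvTrie → List Char → Nat → Nat
  | _, [], _ => 0
  | _, _ :: _, 0 => 0
  | ch, c :: r, k + 1 =>
    match pvFind ch c with
    | none => 0
    | some (w, ch') =>
      let m := pvBM ch' r k
      if m > 0 then m + 1 else if w then 1 else 0

-- descending first-match scan, generic (proof helper mirroring A's for-loop)
def pvDscan (P : Nat → Bool) : Nat → Nat
  | 0 => 0
  | j + 1 => if P (j + 1) then j + 1 else pvDscan P j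

theorem pvDscan_false (P : Nat → Bool) (j : Nat) (h : ∀ L, 1 ≤ L → L ≤ j → P L = false) :
    pvDscan P j = 0 := by
  induction j with
  | zero => rfl
  | succ j ih =>
    simp only [pvDscan, h (j + 1) (by omega) (le_refl _)]
    exact ih (fun L h1 h2 => h L h1 (by omega))

theorem pvDscan_shift (P P' : Nat → Bool) (hP : ∀ e, P (e + 1) = P' e) (j : Nat) :
    pvDscan P (j + 1) = if pvDscan P' j ≠ 0 then pvDscan P' j + 1 else if P' 0 then 1 else 0 := by
  induction j with
  | zero => simp [pvDscan, hP 0]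
  | succ j ih =>
    have h1 : pvDscan P (j + 1 + 1) = if P' (j + 1) then j + 1 + 1 else pvDscan P (j + 1) := by
      rw [show pvDscan P (j + 1 + 1) = if P (j + 1 + 1) then j + 1 + 1 else pvDscan P (j + 1) from rfl,
        hP (j + 1)]
    have h2 : pvDscan P' (j + 1) = if P' (j + 1) then j + 1 else pvDscan P' j := rfl
    by_cases h : P' (j + 1)
    · simp [h1, h2, h]
    · rw [h1, h2]; simp [h, ih]

theorem pvAFind_eq_dscan (words : List (String × Int)) (cs : List Char) (j : Nat) :
    pvAFind words cs j =
      (if pvDscan (fun L => pvKeyMem words (cs.take L)) j = 0 then none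
       else some (pvDscan (fun L => pvKeyMem words (cs.take L)) j)) := by
  induction j with
  | zero => rfl
  | succ j ih =>
    simp only [pvAFind, pvDscan]
    by_cases h : pvKeyMem words (cs.take (j + 1)) <;> simp [h, ih]

theorem pvBM_eq_dscan (cs : List Char) (ch : PvTrie) (b : Bool) (k : Nat) :
    pvBM ch cs k = pvDscan (fun L => pvMemT (b, ch) (cs.take L)) (min k cs.length) := by
  induction cs generalizing ch b k with
  | nil => cases k <;> rfl
  | cons c r ih =>
    cases k with
    | zero => rfl
    | succ k =>
      have hm : min (k + 1) (c :: r).length = min k r.length + 1 := by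
        simp [List.length_cons]
      rw [hm]
      have hshift : ∀ e, (fun L => pvMemT (b, ch) ((c :: r).take L)) (e + 1) =
          (fun e => match pvFind ch c with
                    | none => false
                    | some p => pvMemT p (r.take e)) e := by
        intro e; simp [List.take_succ_cons, pvMemT]
      rw [pvDscan_shift _ _ hshift]
      cases h : pvFind ch c with
      | none =>
        simp only [pvBM, h]
        have hz : pvDscan (fun _ : Nat => false) (min k r.length) = 0 :=
          pvDscan_false _ _ (fun L _ _ => rfl)
        simp [hz]
      | some p =>
        obtain ⟨w, ch'⟩ := p
        simp only [pvBM, h]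
        rw [← ih ch' w k]
        by_cases hb : pvBM ch' r k > 0
        · have hnz : pvBM ch' r k ≠ 0 := by omega
          simp [hb, hnz]
        · have hz : pvBM ch' r k = 0 := by omega
          simp [hz, pvMemT]

theorem pvWalk_spec (cs : List Char) (ch : PvTrie) (cap depth best : Nat) :
    pvWalk ch cs cap depth best =
      if pvBM ch cs (cap - depth) = 0 then best else depth + pvBM ch cs (cap - depth) := by
  induction cs generalizing ch depth best with
  | nil => simp [pvWalk, pvBM]
  | cons c r ih =>
    simp only [pvWalk]
    by_cases hd : depth < cap
    · have hk : cap - depth = (cap - (depth + 1)) + 1 := by omega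
      rw [hk]
      cases h : pvFind ch c with
      | none => simp [pvBM, h, hd]
      | some p =>
        obtain ⟨w, ch'⟩ := p
        simp only [hd, if_pos, h]
        rw [ih ch' (depth + 1) _]
        simp only [pvBM, h]
        by_cases hb : pvBM ch' r (cap - (depth + 1)) > 0
        · have : pvBM ch' r (cap - (depth + 1)) ≠ 0 := by omega
          simp [hb, this]; omega
        · have hz : pvBM ch' r (cap - (depth + 1)) = 0 := by omega
          cases hw : w <;> simp [hz, hw]
    · have : cap - depth = 0 := by omega
      simp [hd, this, pvBM]

theorem pvMemT_bot (r : List Char) : pvMemT (false, PvTrie.nil) r = false := by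
  cases r <;> simp [pvMemT, pvFind]

theorem pvFind_insert_self (ch : PvTrie) (a : Char) (rs : List Char) :
    pvFind (pvInsertCh ch a rs) a =
      some (pvInsertT (((pvFind ch a).getD (false, PvTrie.nil))) rs) := by
  induction ch with
  | nil => cases rs <;> simp [pvInsertCh, pvFind, pvInsertT]
  | node d w c sib ihc ihs =>
    by_cases had : a = d
    · subst had
      cases rs <;> simp [pvInsertCh, pvFind, pvInsertT]
    · cases rs <;> simp [pvInsertCh, pvFind, had, ihs]

theorem pvFind_insert_other (ch : PvTrie) (a c : Char) (rs : List Char) (hca : c ≠ a) :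
    pvFind (pvInsertCh ch a rs) c = pvFind ch c := by
  induction ch with
  | nil => cases rs <;> simp [pvInsertCh, pvFind, hca]
  | node d w c0 sib ihc ihs =>
    by_cases had : a = d
    · subst had
      cases rs <;> simp [pvInsertCh, pvFind, hca, Ne.symm hca]
    · by_cases hcd : c = d <;> cases rs <;> simp [pvInsertCh, pvFind, had, hcd, ihs]

theorem pvMemT_insert (w : List Char) (t : Bool × PvTrie) (s : List Char) :
    pvMemT (pvInsertT t w) s = (s == w || pvMemT t s) := by
  induction w generalizing t s with
  | nil =>
    obtain ⟨b, ch⟩ := t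
    cases s with
    | nil => simp [pvInsertT, pvMemT]
    | cons c r => simp [pvInsertT, pvMemT]
  | cons a w ih =>
    obtain ⟨b, ch⟩ := t
    cases s with
    | nil => simp [pvInsertT, pvMemT]
    | cons c r =>
      simp only [pvInsertT, pvMemT]
      by_cases hca : c = a
      · subst hca
        rw [pvFind_insert_self ch c w]
        simp only [ih]
        cases h : pvFind ch c with
        | none => simp [h, pvMemT_bot]
        | some p => simp [h]
      · rw [pvFind_insert_other ch a c w hca]
        have hne : (c :: r == a :: w) = false := by simp [hca]
        rw [hne]
        simp

theorem pvMemT_build (words : List (String × Int)) (s : List Char) :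
    pvMemT (pvBuild words) s = pvKeyMem words s := by
  unfold pvBuild
  have hgen : ∀ (ws : List (String × Int)) (t : Bool × PvTrie),
      pvMemT (ws.foldl (fun t p => pvInsertT t p.1.toList) t) s
        = (pvKeyMem ws s || pvMemT t s) := by
    intro ws
    induction ws with
    | nil => intro t; simp [pvKeyMem]
    | cons p ws ih =>
      intro t
      simp only [List.foldl_cons, ih, pvMemT_insert, pvKeyMem, List.any_cons]
      have hc : (s == p.1.toList) = (p.1.toList == s) := by simp [BEq.comm]
      rw [hc]
      cases h : p.1.toList == s <;> simp
  rw [hgen]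
  simp [pvMemT_bot]

-- the two caps agree
theorem pvCap_eq (wml : Int) (n : Nat) : (min wml (n : Int)).toNat = min wml.toNat n := by
  rcases le_total wml (n : Int) with h | h <;> simp [min_def, h] <;> omega

-- the inner walk computes exactly A's descending scan, for one suffix
theorem pvStep_eq (words : List (String × Int)) (wml : Int) (c : Char) (rest : List Char) :
    pvWalk (pvBuild words).2 (c :: rest) wml.toNat 0 0
      = pvDscan (fun L => pvKeyMem words ((c :: rest).take L))
          (min wml (((c :: rest).length : Nat) : Int)).toNat := by
  rw [pvWalk_spec, Nat.sub_zero,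
    pvBM_eq_dscan (c :: rest) (pvBuild words).2 (pvBuild words).1, pvCap_eq]
  have hP : (fun L => pvMemT ((pvBuild words).1, (pvBuild words).2) ((c :: rest).take L))
      = (fun L => pvKeyMem words ((c :: rest).take L)) := by
    funext L
    rw [show ((pvBuild words).1, (pvBuild words).2) = pvBuild words from rfl]
    exact pvMemT_build words _
  rw [hP]
  split <;> omega

-- the per-suffix equality of the two loops, by strong induction on the suffix length
theorem pvGo_eq (words : List (String × Int)) (wml : Int) (n : Nat) :
    ∀ cs : List Char, cs.length ≤ n → pvAGo words wml cs = pvBGo (pvBuild words).2 wml.toNat cs := by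
  induction n with
  | zero =>
    intro cs hcs
    have h0 : cs = [] := by cases cs with | nil => rfl | cons a b => simp at hcs
    rw [h0]
    simp [pvAGo, pvBGo]
  | succ n ih =>
    intro cs hcs
    cases cs with
    | nil => simp [pvAGo, pvBGo]
    | cons c rest =>
      have hstep := pvStep_eq words wml c rest
      rw [pvAGo, pvBGo]
      simp only [hstep]
      split
      next L h =>
        rw [pvAFind_eq_dscan] at h
        split at h
        next => cases h
        next hz =>
          injection h with hL
          rw [hL] at hz
          rw [hL]
          simp only [if_neg hz]
          rw [ih ((c :: rest).drop L) (by simp [List.length_drop] at *; omega)]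
      next h =>
        rw [pvAFind_eq_dscan] at h
        split at h
        next hz =>
          simp only [hz, if_pos rfl]
          rw [ih rest (by simp at hcs; omega)]
          simp
        next => cases h

-- ===== VERDICT (by name: the statement is the Claim_ definition above) =====
theorem get_protein_token_lengths_py_spec : Claim_equal_get_protein_token_lengths_py := by
  intro seq words wml _
  unfold Spec_get_protein_token_lengths_py get_protein_token_lengths_py get_protein_token_lengths_py_alt
  exact pvGo_eq words wml seq.toList.length seq.toList (le_refl _)
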